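-- pv_equiv track=rewrite | github.com/Young-Z/X-IPE | src/x_ipe/services/kb_service.py | _derive_folder_status
-- ===== SOURCE A (Python) =====
-- from typing import Any, Dict, List, Optional
--
-- def _derive_folder_status(children: List[Dict[str, Any]]) -> str:
--     """Derive folder status from children: pending > processing > filed (CR-005)."""
--     statuses: set[str] = set()
--     for child in children:
--         statuses.add(child.get('status', 'pending'))
--     if 'pending' in statuses:
--         return 'pending'
--     if 'processing' in statuses:
--         return 'processing'
--     if 'filed' in statuses:
--         return 'filed'
--     return 'pending'  # empty folder defaults to pending
-- ===== SOURCE B (Python) =====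
-- def _derive_folder_status(children):
--     """Derive folder status: running-min over a rank map instead of set + membership checks."""
--     rank = {'pending': 0, 'processing': 1, 'filed': 2}
--     best = 3
--     for child in children:
--         r = rank.get(child.get('status', 'pending'), 3)
--         if r < best:
--             best = r
--             if best == 0:
--                 break
--     return ('pending', 'processing', 'filed')[best] if best < 3 else 'pending'
-- ===== Notes on version B (the rewrite author's own statement) =====
-- stated objective: simpler
-- what changed: Replaces the collected status set and three membership checks with a single running-min over a priority rank map, breaking early on rank 0, then translating the best rank back to a status.
import Mathlib
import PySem

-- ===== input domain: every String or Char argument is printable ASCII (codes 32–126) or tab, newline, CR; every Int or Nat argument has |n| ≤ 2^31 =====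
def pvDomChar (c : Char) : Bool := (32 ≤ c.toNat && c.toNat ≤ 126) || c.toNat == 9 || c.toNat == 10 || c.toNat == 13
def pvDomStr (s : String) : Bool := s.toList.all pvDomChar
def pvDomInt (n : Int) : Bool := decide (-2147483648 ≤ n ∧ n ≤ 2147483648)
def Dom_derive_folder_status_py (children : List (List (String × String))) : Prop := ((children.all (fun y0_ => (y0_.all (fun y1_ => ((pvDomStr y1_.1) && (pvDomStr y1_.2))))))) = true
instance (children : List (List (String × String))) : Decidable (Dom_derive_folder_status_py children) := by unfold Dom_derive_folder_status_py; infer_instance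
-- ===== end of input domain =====

-- B replaces the collected status set + three membership checks with a running-min over a rank map (simpler decomposition, same cost).

-- ===== PORT A =====
def derive_folder_status_py (children : List (List (String × String))) : String :=
  let statuses : PySem.Set String :=
    children.foldl (fun s child => PySem.Set.add s (PySem.Dict.getD (PySem.Dict.mk child) "status" "pending")) PySem.Set.empty
  if PySem.Set.contains statuses "pending" then "pending"
  else if PySem.Set.contains statuses "processing" then "processing"
  else if PySem.Set.contains statuses "filed" then "filed"
  else "pending"

-- ===== PORT B =====
-- rank.get(status, 3): the rank map as a lookup function
def pvRankOf (s : String) : Nat :=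
  if s = "pending" then 0 else if s = "processing" then 1 else if s = "filed" then 2 else 3

-- the 'for child in children' loop with the early break when best hits 0
def pvBestLoop : List (List (String × String)) → Nat → Nat
  | [], best => best
  | child :: rest, best =>
    let r := pvRankOf (PySem.Dict.getD (PySem.Dict.mk child) "status" "pending")
    if r < best then
      if r = 0 then r else pvBestLoop rest r
    else pvBestLoop rest best

def derive_folder_status_py_alt (children : List (List (String × String))) : String :=
  let best := pvBestLoop children 3
  if best < 3 then ["pending", "processing", "filed"].getD best "pending" else "pending"

-- ===== PRECONDITION & SPEC =====
def Spec_derive_folder_status_py (children : List (List (String × String))) (out : String) : Prop := out = derive_folder_status_py_alt children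
instance (children : List (List (String × String))) (out : String) : Decidable (Spec_derive_folder_status_py children out) := by unfold Spec_derive_folder_status_py; infer_instance

-- ===== CLAIM (what is proved, stated in full; the proofs are below) =====
def Claim_equal_derive_folder_status_py : Prop := ∀ (children : List (List (String × String))), Dom_derive_folder_status_py children → Spec_derive_folder_status_py children (derive_folder_status_py children)

-- ===== LEMMAS AND PROOFS =====

def pvStatusOf (child : List (String × String)) : String :=
  PySem.Dict.getD (PySem.Dict.mk child) "status" "pending"

def pvMinRank (children : List (List (String × String))) : Nat :=
  children.foldr (fun c a => min (pvRankOf (pvStatusOf c)) a) 3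

lemma pvMinRank_nil : pvMinRank [] = 3 := rfl

lemma pvMinRank_cons (d : List (String × String)) (rest : List (List (String × String))) :
    pvMinRank (d :: rest) = min (pvRankOf (pvStatusOf d)) (pvMinRank rest) := rfl

lemma pvMinRank_le (children : List (List (String × String))) : pvMinRank children ≤ 3 := by
  induction children with
  | nil => simp [pvMinRank_nil]
  | cons c rest ih => rw [pvMinRank_cons]; omega

lemma pvBestLoop_eq_min (children : List (List (String × String))) :
    ∀ best, best ≤ 3 → pvBestLoop children best = min best (pvMinRank children) := by
  induction children with
  | nil => intro best hb; simp only [pvBestLoop, pvMinRank_nil]; omega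
  | cons c rest ih =>
    intro best hb
    have h := pvMinRank_le rest
    rw [pvMinRank_cons]
    show (if pvRankOf (pvStatusOf c) < best then
            if pvRankOf (pvStatusOf c) = 0 then pvRankOf (pvStatusOf c) else pvBestLoop rest (pvRankOf (pvStatusOf c))
          else pvBestLoop rest best)
        = min best (min (pvRankOf (pvStatusOf c)) (pvMinRank rest))
    split_ifs with h1 h2
    · omega
    · rw [ih _ (by omega)]; omega
    · rw [ih _ hb]; omega

lemma pvMinRank_le_of_mem {children : List (List (String × String))} {c : List (String × String)}
    (hc : c ∈ children) : pvMinRank children ≤ pvRankOf (pvStatusOf c) := by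
  induction children with
  | nil => cases hc
  | cons d rest ih =>
    rw [pvMinRank_cons]
    rcases List.mem_cons.mp hc with rfl | h
    · omega
    · have := ih h; omega

lemma pvMinRank_attained (children : List (List (String × String))) :
    pvMinRank children = 3 ∨ ∃ c ∈ children, pvMinRank children = pvRankOf (pvStatusOf c) := by
  induction children with
  | nil => left; rfl
  | cons d rest ih =>
    rw [pvMinRank_cons]
    rcases Nat.le_total (pvRankOf (pvStatusOf d)) (pvMinRank rest) with h | h
    · right; exact ⟨d, by simp, by omega⟩
    · rcases ih with h3 | ⟨c, hc, he⟩
      · rcases Nat.eq_or_lt_of_le h with he | _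
        · right; exact ⟨d, by simp, by omega⟩
        · left; omega
      · right; exact ⟨c, by simp [hc], by omega⟩

lemma pvRankOf_eq_zero_iff (s : String) : pvRankOf s = 0 ↔ s = "pending" := by
  unfold pvRankOf; split_ifs <;> simp_all

lemma pvRankOf_eq_one_iff (s : String) : pvRankOf s = 1 ↔ s = "processing" := by
  unfold pvRankOf; split_ifs <;> simp_all

lemma pvRankOf_eq_two_iff (s : String) : pvRankOf s = 2 ↔ s = "filed" := by
  unfold pvRankOf; split_ifs <;> simp_all

lemma pvContains_iff (children : List (List (String × String))) (x : String) :
    PySem.Set.contains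
      (children.foldl (fun s child => PySem.Set.add s (PySem.Dict.getD (PySem.Dict.mk child) "status" "pending")) PySem.Set.empty) x
      = true ↔ ∃ c ∈ children, pvStatusOf c = x := by
  rw [PySem.Set.contains_iff, PySem.Set.mem_foldl_add]
  simp [PySem.Set.empty, pvStatusOf, eq_comm]

-- ===== VERDICT (by name: the statement is the Claim_ definition above) =====
theorem derive_folder_status_py_spec : Claim_equal_derive_folder_status_py := by
  unfold Claim_equal_derive_folder_status_py
  intro children _
  unfold Spec_derive_folder_status_py derive_folder_status_py derive_folder_status_py_alt
  rw [pvBestLoop_eq_min _ _ (by omega)]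
  have hle := pvMinRank_le children
  rw [min_eq_right hle]
  by_cases hp : ∃ c ∈ children, pvStatusOf c = "pending"
  · obtain ⟨c, hc, hs⟩ := hp
    have h0 : pvMinRank children = 0 := by
      have h := pvMinRank_le_of_mem hc
      rw [hs, show pvRankOf "pending" = 0 from by decide] at h
      omega
    rw [if_pos ((pvContains_iff children "pending").mpr ⟨c, hc, hs⟩), h0]
    simp
  · have h0 : pvMinRank children ≠ 0 := by
      intro h
      rcases pvMinRank_attained children with h3 | ⟨c, hc, he⟩
      · omega
      · exact hp ⟨c, hc, (pvRankOf_eq_zero_iff _).mp (by omega)⟩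
    rw [if_neg (fun hc => hp ((pvContains_iff children "pending").mp hc))]
    by_cases hq : ∃ c ∈ children, pvStatusOf c = "processing"
    · obtain ⟨c, hc, hs⟩ := hq
      have h1 : pvMinRank children = 1 := by
        have h := pvMinRank_le_of_mem hc
        rw [hs, show pvRankOf "processing" = 1 from by decide] at h
        omega
      rw [if_pos ((pvContains_iff children "processing").mpr ⟨c, hc, hs⟩), h1]
      simp
    · have h1 : pvMinRank children ≠ 1 := by
        intro h
        rcases pvMinRank_attained children with h3 | ⟨c, hc, he⟩
        · omega
        · exact hq ⟨c, hc, (pvRankOf_eq_one_iff _).mp (by omega)⟩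
      rw [if_neg (fun hc => hq ((pvContains_iff children "processing").mp hc))]
      by_cases hf : ∃ c ∈ children, pvStatusOf c = "filed"
      · obtain ⟨c, hc, hs⟩ := hf
        have h2 : pvMinRank children = 2 := by
          have h := pvMinRank_le_of_mem hc
          rw [hs, show pvRankOf "filed" = 2 from by decide] at h
          omega
        rw [if_pos ((pvContains_iff children "filed").mpr ⟨c, hc, hs⟩), h2]
        simp
      · have h2 : pvMinRank children ≠ 2 := by
          intro h
          rcases pvMinRank_attained children with h3 | ⟨c, hc, he⟩
          · omega
          · exact hf ⟨c, hc, (pvRankOf_eq_two_iff _).mp (by omega)⟩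
        rw [if_neg (fun hc => hf ((pvContains_iff children "filed").mp hc))]
        rw [show pvMinRank children = 3 from by omega]
        simp
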